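-- pv_equiv track=rewrite | github.com/Ahemad7429/Problem-Solving | tgp/c1_level.py | onlyKString
-- ===== SOURCE A (Python) =====
-- def onlyKString(s, k):
--   words = []
--   word = ""
--   for ch in s:
--     if(ch == " "):
--       words.append(word)
--       word = ""
--     else:
--       word += ch
--
--     if(len(words) == k):
--       return " ".join(words)
-- ===== SOURCE B (Python) =====
-- def onlyKString(s, k):
--     parts = s.split(" ")
--     if 0 <= k < len(parts):
--         return " ".join(parts[:k])
--     return None
-- ===== Notes on version B (the rewrite author's own statement) =====
-- stated objective: simpler
-- what changed: Replaced A's character-by-character accumulator loop with early return by a single tokenize-then-slice: split on " ", guard 0 <= k < len(parts), join the first k parts.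
-- intended difference: For k = 0 with s empty or starting with a space, A returns None (its len(words)==k check can never fire once a word was appended) while B returns "", the join of the first 0 words, which is the intended value and matches A's own answer for k = 0 on other strings. — e.g. on onlyKString(" a", 0): A returns none, B returns some ""
import Mathlib
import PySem

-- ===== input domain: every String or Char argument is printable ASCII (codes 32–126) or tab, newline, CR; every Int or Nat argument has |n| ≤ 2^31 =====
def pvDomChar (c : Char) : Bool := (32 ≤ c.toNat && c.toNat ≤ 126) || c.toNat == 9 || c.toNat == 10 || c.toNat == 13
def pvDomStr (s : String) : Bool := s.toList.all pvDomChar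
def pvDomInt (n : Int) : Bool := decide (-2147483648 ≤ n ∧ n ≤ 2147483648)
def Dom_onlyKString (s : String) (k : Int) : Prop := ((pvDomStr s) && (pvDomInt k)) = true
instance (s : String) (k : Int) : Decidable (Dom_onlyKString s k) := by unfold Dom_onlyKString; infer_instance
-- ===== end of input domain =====

-- B replaces A's character-by-character accumulator loop by tokenize (split on " "), guard, slice and join;
-- objective: simpler.  On k = 0 with empty or space-initial s, A returns None by accident and B returns "" (see D_ below).

-- ===== PORT A =====
-- A's loop: state (words, word), append word at each space, rebuild word char by char,
-- early return " ".join(words) as soon as len(words) == k; falling off the loop is None.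
def onlyKStringGo (k : Int) (words : List (List Char)) (word : List Char) :
    List Char → Option (List Char)
  | [] => none
  | ch :: rest =>
    let p := if ch = ' ' then (words ++ [word], ([] : List Char)) else (words, word ++ [ch])
    if (p.1.length : Int) = k then some (PySem.Chars.join [' '] p.1)
    else onlyKStringGo k p.1 p.2 rest

def onlyKString (s : String) (k : Int) : Option String :=
  (onlyKStringGo k [] [] s.toList).map String.ofList

-- ===== PORT B =====
def onlyKString_alt (s : String) (k : Int) : Option String :=
  let parts := PySem.Chars.splitOn s.toList [' ']
  if 0 ≤ k ∧ k < (parts.length : Int) then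
    some (String.ofList (PySem.Chars.join [' '] (PySem.List.slice parts none (some k))))
  else none

-- ===== PRECONDITION & SPEC =====
-- On k = 0 with s empty or starting with a space, A returns None (its length check can never fire at 0
-- once a word has been appended) while B returns "", the first 0 words — the intended value.
def D_onlyKString (s : String) (k : Int) : Prop :=
  k = 0 ∧ (s.toList = [] ∨ s.toList.head? = some ' ')
instance (s : String) (k : Int) : Decidable (D_onlyKString s k) := by
  unfold D_onlyKString; infer_instance

def Spec_onlyKString (s : String) (k : Int) (out : Option String) : Prop :=
  ¬ D_onlyKString s k → out = onlyKString_alt s k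
instance (s : String) (k : Int) (out : Option String) : Decidable (Spec_onlyKString s k out) := by
  unfold Spec_onlyKString; infer_instance

def pvDiffWitness_onlyKString : String × Int := (" a", 0)
def pvDiffWitnessOut_onlyKString : (Option String) × (Option String) := (none, some "")

-- ===== CLAIM (what is proved, stated in full; the proofs are below) =====
def Claim_unchanged_onlyKString : Prop := ∀ (s : String) (k : Int), Dom_onlyKString s k → Spec_onlyKString s k (onlyKString s k)
def Claim_changed_onlyKString : Prop := Dom_onlyKString (pvDiffWitness_onlyKString.1) (pvDiffWitness_onlyKString.2) ∧ D_onlyKString (pvDiffWitness_onlyKString.1) (pvDiffWitness_onlyKString.2) ∧ onlyKString (pvDiffWitness_onlyKString.1) (pvDiffWitness_onlyKString.2) = pvDiffWitnessOut_onlyKString.1 ∧ onlyKString_alt (pvDiffWitness_onlyKString.1) (pvDiffWitness_onlyKString.2) = pvDiffWitnessOut_onlyKString.2 ∧ pvDiffWitnessOut_onlyKString.1 ≠ pvDiffWitnessOut_onlyKString.2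
def Claim_exact_onlyKString : Prop := ∀ (s : String) (k : Int), Dom_onlyKString s k → D_onlyKString s k → onlyKString s k ≠ onlyKString_alt s k

-- ===== LEMMAS AND PROOFS =====

-- simple structural form of s.split(" ")
def pvSp : List Char → List (List Char)
  | [] => [[]]
  | c :: r => if c = ' ' then [] :: pvSp r else (pvSp r).modifyHead (c :: ·)

theorem pvSp_ne_nil (cs : List Char) : pvSp cs ≠ [] := by
  induction cs with
  | nil => simp [pvSp]
  | cons c r ih =>
    simp only [pvSp]
    split
    · simp
    · cases h : pvSp r with
      | nil => exact absurd h ih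
      | cons hl tl => simp [List.modifyHead]

theorem pvSp_length (cs : List Char) : (pvSp cs).length = cs.count ' ' + 1 := by
  induction cs with
  | nil => simp [pvSp]
  | cons c r ih =>
    by_cases h : c = ' '
    · simp [pvSp, h, ih]
    · have : (c == ' ') = false := by simp [h]
      simp [pvSp, h, ih]

theorem pvSp_append (w r : List Char) (hw : ' ' ∉ w) :
    pvSp (w ++ ' ' :: r) = w :: pvSp r := by
  induction w with
  | nil => simp [pvSp]
  | cons c w' ih =>
    have hc : c ≠ ' ' := fun h => hw (by simp [h])
    have hw' : ' ' ∉ w' := fun h => hw (by simp [h])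
    simp [pvSp, hc, ih hw', List.modifyHead]

theorem splitOn_go_eq : ∀ (fuel : Nat) (l cur : List Char) (acc : List (List Char)),
    l.length ≤ fuel →
    PySem.Chars.splitOn.go [' '] fuel l cur acc =
      acc.reverse ++ (pvSp l).modifyHead (cur.reverse ++ ·) := by
  intro fuel
  induction fuel with
  | zero =>
    intro l cur acc h
    have : l = [] := by cases l <;> simp_all
    subst this
    simp [PySem.Chars.splitOn.go, pvSp, List.modifyHead]
  | succ n ih =>
    intro l cur acc h
    cases l with
    | nil => simp [PySem.Chars.splitOn.go, pvSp, List.modifyHead]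
    | cons c rest =>
      by_cases hc : c = ' '
      · subst hc
        have hpre : [' '].isPrefixOf (' ' :: rest) = true := by simp [List.isPrefixOf]
        rw [PySem.Chars.splitOn.go]
        simp only [hpre, if_pos]
        simp only [List.length_singleton, List.drop_succ_cons, List.drop_zero]
        rw [ih rest [] (cur.reverse :: acc) (by simpa using Nat.le_of_succ_le_succ h)]
        simp only [pvSp, List.modifyHead, List.reverse_cons, List.reverse_nil,
          List.nil_append, List.append_assoc, List.singleton_append]
        cases pvSp rest <;> simp
      · have hpre : [' '].isPrefixOf (c :: rest) = false := by
          simp [List.isPrefixOf]; exact fun h' => hc h'.symm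
        rw [PySem.Chars.splitOn.go]
        simp only [hpre, Bool.false_eq_true, if_neg, not_false_iff]
        rw [ih rest (c :: cur) acc (by simpa using Nat.le_of_succ_le_succ h)]
        cases hsp : pvSp rest with
        | nil => exact absurd hsp (pvSp_ne_nil rest)
        | cons hl tl => simp [pvSp, hc, hsp, List.modifyHead]

theorem splitOn_eq_pvSp (cs : List Char) :
    PySem.Chars.splitOn cs [' '] = pvSp cs := by
  unfold PySem.Chars.splitOn
  rw [splitOn_go_eq (cs.length + 1) cs [] [] (by omega)]
  cases h : pvSp cs with
  | nil => exact absurd h (pvSp_ne_nil cs)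
  | cons hl tl => simp [List.modifyHead]

-- A's loop never fires its check once len(words) already exceeds k (len only grows)
theorem goA_over : ∀ (cs : List Char) (k : Int) (words : List (List Char)) (word : List Char),
    k < (words.length : Int) → onlyKStringGo k words word cs = none := by
  intro cs
  induction cs with
  | nil => intro k words word _; rfl
  | cons ch rest ih =>
    intro k words word h
    by_cases hc : ch = ' '
    · have hne : ¬ (((words ++ [word]).length : Int) = k) := by simp; omega
      simp only [onlyKStringGo, if_pos hc]
      rw [if_neg hne]
      exact ih k (words ++ [word]) [] (by simp; omega)
    · have hne : ¬ ((words.length : Int) = k) := by omega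
      simp only [onlyKStringGo, if_neg hc]
      rw [if_neg hne]
      exact ih k words (word ++ [ch]) h

theorem goA_neg (cs : List Char) (k : Int) (words : List (List Char)) (word : List Char)
    (h : k < 0) : onlyKStringGo k words word cs = none :=
  goA_over cs k words word (by omega)

-- the main invariant of A's loop, phrased against pvSp
theorem goA_main : ∀ (cs : List Char) (k : Int) (words : List (List Char)) (word : List Char),
    (words.length : Int) < k → ' ' ∉ word →
    onlyKStringGo k words word cs =
      (if k ≤ (words.length : Int) + (cs.count ' ' : Int)
       then some (PySem.Chars.join [' ']
              (words ++ (pvSp (word ++ cs)).take (k - words.length).toNat))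
       else none) := by
  intro cs
  induction cs with
  | nil =>
    intro k words word h _
    rw [show onlyKStringGo k words word [] = none from rfl,
      if_neg (by push_cast [List.count_nil]; omega)]
  | cons ch rest ih =>
    intro k words word h hw
    by_cases hc : ch = ' '
    · subst hc
      have hcount : ((' ' :: rest).count ' ' : Int) = (rest.count ' ' : Int) + 1 := by
        simp
      by_cases hk : ((words ++ [word]).length : Int) = k
      · have hk' : k = (words.length : Int) + 1 := by simpa using hk.symm
        have hcond : k ≤ (words.length : Int) + ((' ' :: rest).count ' ' : Int) := by
          rw [hcount]; omega
        have htake : (k - words.length).toNat = 1 := by omega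
        simp only [onlyKStringGo, reduceIte]
        rw [if_pos hk, if_pos hcond, pvSp_append word rest hw, htake]
        simp
      · have hlt : ((words ++ [word]).length : Int) < k := by simp at hk ⊢; omega
        simp only [onlyKStringGo, reduceIte]
        rw [if_neg hk, ih k (words ++ [word]) [] hlt (by simp),
          pvSp_append word rest hw]
        have e1 : ((k ≤ (words ++ [word]).length + (rest.count ' ' : Int)))
            = (k ≤ (words.length : Int) + ((' ' :: rest).count ' ' : Int)) := by
          rw [hcount]; simp; constructor <;> (intro; omega)
        split
        next hcnd =>
          have hcnd' : k ≤ (words.length : Int) + ((' ' :: rest).count ' ' : Int) := by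
            rw [← e1]; exact_mod_cast hcnd
          rw [if_pos hcnd']
          have harith : (k - (words.length : Int)).toNat
              = (k - ((words ++ [word]).length : Int)).toNat + 1 := by simp; omega
          rw [harith]
          simp [List.take_succ_cons]
        next hcnd =>
          have hcnd' : ¬ k ≤ (words.length : Int) + ((' ' :: rest).count ' ' : Int) := by
            rw [← e1]; exact_mod_cast hcnd
          rw [if_neg hcnd']
    · have hw' : ' ' ∉ word ++ [ch] := by
        intro hmem
        rcases List.mem_append.mp hmem with h1 | h1
        · exact hw h1
        · exact hc ((List.mem_singleton.mp h1).symm)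
      have hne : ¬ ((words.length : Int) = k) := by omega
      have hcount : ((ch :: rest).count ' ' : Int) = (rest.count ' ' : Int) := by
        simp [hc]
      simp only [onlyKStringGo, if_neg hc]
      rw [if_neg hne, ih k words (word ++ [ch]) h hw']
      rw [hcount, List.append_assoc]
      rfl

theorem alt_eval (s : String) (k : Int) :
    onlyKString_alt s k =
      (if 0 ≤ k ∧ k ≤ (s.toList.count ' ' : Int)
       then some (String.ofList (PySem.Chars.join [' '] ((pvSp s.toList).take k.toNat)))
       else none) := by
  simp only [onlyKString_alt]
  rw [splitOn_eq_pvSp]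
  have hlen : ((pvSp s.toList).length : Int) = (s.toList.count ' ' : Int) + 1 := by
    rw [pvSp_length]; push_cast; ring
  by_cases hk : 0 ≤ k ∧ k ≤ (s.toList.count ' ' : Int)
  · have hcond : 0 ≤ k ∧ k < ((pvSp s.toList).length : Int) := by
      constructor
      · exact hk.1
      · rw [hlen]; omega
    rw [if_pos hcond, if_pos hk, PySem.List.slice_to (pvSp s.toList) hk.1]
  · have hcond : ¬ (0 ≤ k ∧ k < ((pvSp s.toList).length : Int)) := by
      rw [hlen]; omega
    rw [if_neg hcond, if_neg hk]

-- ===== VERDICT (by name: the statement is the Claim_ definition above) =====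
theorem onlyKString_spec : Claim_unchanged_onlyKString := by
  intro s k _ hD
  show onlyKString s k = onlyKString_alt s k
  rw [alt_eval]
  unfold onlyKString
  rcases lt_trichotomy k 0 with hk | hk | hk
  · rw [goA_neg s.toList k [] [] hk, if_neg (by omega)]; rfl
  · subst hk
    unfold D_onlyKString at hD
    cases hcs : s.toList with
    | nil => exact absurd ⟨rfl, Or.inl hcs⟩ hD
    | cons c rest =>
      have hc : c ≠ ' ' := by
        intro hc
        exact hD ⟨rfl, Or.inr (by rw [hcs, hc]; rfl)⟩
      have hcond : (0 : Int) ≤ 0 ∧ (0 : Int) ≤ ((c :: rest).count ' ' : Int) := by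
        constructor
        · omega
        · positivity
      rw [if_pos hcond]
      simp only [onlyKStringGo, if_neg hc]
      rw [if_pos (by simp)]
      simp [PySem.Chars.join, List.intercalate]
  · rw [goA_main s.toList k [] [] (by simpa using hk) (by simp)]
    simp only [List.length_nil, Int.natCast_zero, zero_add, List.nil_append, sub_zero]
    by_cases hcond : k ≤ (s.toList.count ' ' : Int)
    · rw [if_pos hcond, if_pos ⟨by omega, hcond⟩]; rfl
    · rw [if_neg hcond, if_neg (by omega)]; rfl

theorem onlyKString_changed : Claim_changed_onlyKString := by
  unfold Claim_changed_onlyKString; decide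

theorem onlyKString_tight : Claim_exact_onlyKString := by
  intro s k _ hD
  unfold D_onlyKString at hD
  obtain ⟨hk0, hcase⟩ := hD
  subst hk0
  have hB : onlyKString_alt s 0 =
      some (String.ofList (PySem.Chars.join [' '] ((pvSp s.toList).take (0 : Int).toNat))) := by
    rw [alt_eval]
    exact if_pos ⟨le_refl 0, by positivity⟩
  have hA : onlyKString s 0 = none := by
    unfold onlyKString
    rcases hcase with hnil | hhead
    · rw [hnil]; rfl
    · obtain ⟨rest, hcs⟩ : ∃ rest, s.toList = ' ' :: rest := by
        cases h : s.toList with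
        | nil => rw [h] at hhead; simp at hhead
        | cons c r =>
          rw [h] at hhead
          simp at hhead
          exact ⟨r, by rw [hhead]⟩
      rw [hcs]
      simp only [onlyKStringGo, reduceIte]
      rw [if_neg (by simp), goA_over rest 0 ([] ++ [[]]) [] (by simp)]
      rfl
  rw [hA, hB]
  simp
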